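-- pv_equiv track=rewrite | github.com/jameskhedley/advent-of-code-solutions | 2024/day5.py | violations
-- ===== SOURCE A (Python) =====
-- def violations(u, rules):
--     v = 0
--     for rule in rules:
--         bef, aft = rule
--         if bef in u and aft in u:
--             pos_bef = u.index(bef)
--             pos_aft = u.index(aft)
--             if pos_bef > pos_aft:
--                 v+=1
--
--     return v
-- ===== SOURCE B (Python) =====
-- def violations(u, rules):
--     by_bef = {}
--     for bef, aft in rules:
--         by_bef[bef] = by_bef.get(bef, []) + [aft]
--     v = 0
--     seen = set()
--     for x in u:
--         if x not in seen:
--             for aft in by_bef.get(x, []):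
--                 if aft in seen:
--                     v += 1
--             seen.add(x)
--     return v
-- ===== Notes on version B (the rewrite author's own statement) =====
-- stated objective: faster
-- what changed: Instead of scanning u with 'in' and .index for every rule, B groups the rules once into an inverted index bef->list of afts and makes a single left-to-right sweep over u with a maintained seen-set, counting, at each first occurrence, the afts already seen.
import Mathlib
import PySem

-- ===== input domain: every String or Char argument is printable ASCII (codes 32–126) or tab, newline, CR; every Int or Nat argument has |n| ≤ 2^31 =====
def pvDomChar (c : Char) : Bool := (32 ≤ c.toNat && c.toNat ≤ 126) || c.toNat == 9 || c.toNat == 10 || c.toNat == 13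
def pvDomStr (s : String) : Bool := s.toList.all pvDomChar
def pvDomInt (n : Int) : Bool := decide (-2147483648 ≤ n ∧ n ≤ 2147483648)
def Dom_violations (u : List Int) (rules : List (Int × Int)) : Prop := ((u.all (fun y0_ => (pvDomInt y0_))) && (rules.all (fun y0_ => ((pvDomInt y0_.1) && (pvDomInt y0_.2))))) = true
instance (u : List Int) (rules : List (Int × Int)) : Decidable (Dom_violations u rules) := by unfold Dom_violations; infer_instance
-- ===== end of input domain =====

-- B replaces A's per-rule .index scans with an inverted index and one sweep over u (faster).

-- ===== PORT A =====
def violations (u : List Int) (rules : List (Int × Int)) : Int :=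
  rules.foldl (fun v rule =>
    if rule.1 ∈ u ∧ rule.2 ∈ u then
      -- Python u.index(bef)/u.index(aft); the membership guard makes them succeed,
      -- so the none-branch below is unreachable
      match PySem.List.index? u rule.1, PySem.List.index? u rule.2 with
      | some pos_bef, some pos_aft => if pos_bef > pos_aft then v + 1 else v
      | _, _ => v
    else v) 0

-- ===== PORT B =====
def violations_alt (u : List Int) (rules : List (Int × Int)) : Int :=
  let byBef : PySem.Dict Int (List Int) :=
    rules.foldl (fun d r => d.modify r.1 [] (· ++ [r.2])) PySem.Dict.empty
  (u.foldl (fun (st : Int × PySem.Set Int) x =>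
      if PySem.Set.contains st.2 x then st
      else
        ((byBef.getD x []).foldl
            (fun v aft => if PySem.Set.contains st.2 aft then v + 1 else v) st.1,
         PySem.Set.add st.2 x))
    ((0 : Int), PySem.Set.empty)).1

-- ===== PRECONDITION & SPEC =====
def Spec_violations (u : List Int) (rules : List (Int × Int)) (out : Int) : Prop := out = violations_alt u rules
instance (u : List Int) (rules : List (Int × Int)) (out : Int) : Decidable (Spec_violations u rules out) := by unfold Spec_violations; infer_instance

-- ===== CLAIM (what is proved, stated in full; the proofs are below) =====
def Claim_equal_violations : Prop := ∀ (u : List Int) (rules : List (Int × Int)), Dom_violations u rules → Spec_violations u rules (violations u rules)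

-- ===== LEMMAS AND PROOFS =====

-- per-rule indicator: 1 iff both endpoints occur in p and aft's first occurrence precedes bef's
def pvInd (p : List Int) (r : Int × Int) : Int :=
  match PySem.List.index? p r.1, PySem.List.index? p r.2 with
  | some ib, some ia => if ia < ib then 1 else 0
  | _, _ => 0

theorem pv_index?_lt {p : List Int} {b : Int} {k : Nat}
    (h : PySem.List.index? p b = some k) : k < p.length := by
  obtain ⟨hk, -, -⟩ := PySem.List.getElem_of_index?_eq_some h
  exact hk

theorem pv_index?_append_of_mem {p : List Int} {x b : Int} (hx : x ∈ p) :
    PySem.List.index? (p ++ [x]) b = PySem.List.index? p b := by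
  by_cases hb : b ∈ p
  · exact PySem.List.index?_append_of_mem _ hb
  · have h1 : PySem.List.index? p b = none := (PySem.List.index?_eq_none_iff _ _).mpr hb
    have h2 : b ∉ p ++ [x] := by
      intro hmem
      rcases List.mem_append.mp hmem with h | h
      · exact hb h
      · rw [List.mem_singleton] at h; subst h; exact hb hx
    rw [h1, (PySem.List.index?_eq_none_iff _ _).mpr h2]

theorem pvInd_append_mem {p : List Int} {x : Int} (hx : x ∈ p) (r : Int × Int) :
    pvInd (p ++ [x]) r = pvInd p r := by
  unfold pvInd
  rw [pv_index?_append_of_mem hx, pv_index?_append_of_mem hx]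

theorem pvInd_append_not_mem {p : List Int} {x : Int} (hx : x ∉ p) (r : Int × Int) :
    pvInd (p ++ [x]) r = pvInd p r + (if r.1 = x ∧ r.2 ∈ p then 1 else 0) := by
  unfold pvInd
  by_cases h1 : r.1 = x
  · have hb : PySem.List.index? (p ++ [x]) r.1 = some p.length := by
      rw [h1]; exact PySem.List.index?_append_singleton_self _ _ hx
    have hbn : PySem.List.index? p r.1 = none :=
      (PySem.List.index?_eq_none_iff _ _).mpr (by rw [h1]; exact hx)
    rw [hb, hbn]
    by_cases h2 : r.2 ∈ p
    · obtain ⟨ia, hia⟩ := Option.isSome_iff_exists.mp ((PySem.List.index?_isSome_iff _ _).mpr h2)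
      rw [PySem.List.index?_append_of_mem _ h2, hia]
      have := pv_index?_lt hia
      simp [h1, h2, this]
    · by_cases h3 : r.2 = x
      · have hb2 : PySem.List.index? (p ++ [x]) r.2 = some p.length := by
          rw [h3]; exact PySem.List.index?_append_singleton_self _ _ hx
        rw [hb2]
        simp [h2]
      · have hnm : r.2 ∉ p ++ [x] := by
          intro hmem
          rcases List.mem_append.mp hmem with h | h
          · exact h2 h
          · rw [List.mem_singleton] at h; exact h3 h
        rw [(PySem.List.index?_eq_none_iff _ _).mpr hnm]
        simp [h2]
  · have hifr : (if r.1 = x ∧ r.2 ∈ p then (1:Int) else 0) = 0 := by simp [h1]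
    rw [hifr, add_zero]
    by_cases hb : r.1 ∈ p
    · obtain ⟨ib, hib⟩ := Option.isSome_iff_exists.mp ((PySem.List.index?_isSome_iff _ _).mpr hb)
      rw [PySem.List.index?_append_of_mem _ hb, hib]
      by_cases h2 : r.2 ∈ p
      · rw [PySem.List.index?_append_of_mem _ h2]
      · by_cases h3 : r.2 = x
        · have hb2 : PySem.List.index? (p ++ [x]) r.2 = some p.length := by
            rw [h3]; exact PySem.List.index?_append_singleton_self _ _ hx
          rw [hb2, (PySem.List.index?_eq_none_iff _ _).mpr h2]
          have := pv_index?_lt hib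
          simp [Nat.not_lt.mpr (Nat.le_of_lt this)]
        · have : r.2 ∉ p ++ [x] := by
            simp only [List.mem_append, List.mem_singleton]
            rintro (h | h) <;> [exact h2 h; exact h3 h]
          rw [(PySem.List.index?_eq_none_iff _ _).mpr this,
              (PySem.List.index?_eq_none_iff _ _).mpr h2]
    · have hfn : PySem.List.index? p r.1 = none := (PySem.List.index?_eq_none_iff _ _).mpr hb
      have : r.1 ∉ p ++ [x] := by
        simp only [List.mem_append, List.mem_singleton]
        rintro (h | h) <;> [exact hb h; exact h1 h]
      rw [(PySem.List.index?_eq_none_iff _ _).mpr this, hfn]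

-- A's loop accumulates the per-rule indicator
theorem pvA_foldl (u : List Int) :
    ∀ (rs : List (Int × Int)) (v : Int),
      rs.foldl (fun v rule =>
        if rule.1 ∈ u ∧ rule.2 ∈ u then
          match PySem.List.index? u rule.1, PySem.List.index? u rule.2 with
          | some pos_bef, some pos_aft => if pos_bef > pos_aft then v + 1 else v
          | _, _ => v
        else v) v = v + (rs.map (pvInd u)).sum := by
  intro rs
  induction rs with
  | nil => intro v; simp
  | cons r rs ih =>
    intro v
    simp only [List.foldl_cons, List.map_cons, List.sum_cons, ih]
    have hstep : (if r.1 ∈ u ∧ r.2 ∈ u then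
          match PySem.List.index? u r.1, PySem.List.index? u r.2 with
          | some pos_bef, some pos_aft => if pos_bef > pos_aft then v + 1 else v
          | _, _ => v
        else v) = v + pvInd u r := by
      by_cases h1 : r.1 ∈ u
      · by_cases h2 : r.2 ∈ u
        · obtain ⟨ib, hib⟩ := Option.isSome_iff_exists.mp ((PySem.List.index?_isSome_iff _ _).mpr h1)
          obtain ⟨ia, hia⟩ := Option.isSome_iff_exists.mp ((PySem.List.index?_isSome_iff _ _).mpr h2)
          rw [if_pos ⟨h1, h2⟩]
          unfold pvInd
          rw [hib, hia]
          show (if ib > ia then v + 1 else v) = v + (if ia < ib then 1 else 0)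
          split_ifs <;> omega
        · unfold pvInd
          rw [(PySem.List.index?_eq_none_iff _ _).mpr h2]
          simp [h1, h2]
      · unfold pvInd
        rw [(PySem.List.index?_eq_none_iff _ _).mpr h1]
        simp [h1]
    rw [hstep]; ring

-- the inner count over a list against a fixed seen-set
theorem pvInner (s : PySem.Set Int) :
    ∀ (l : List Int) (v : Int),
      l.foldl (fun v aft => if PySem.Set.contains s aft then v + 1 else v) v
        = v + (l.map (fun a => if a ∈ s then (1:Int) else 0)).sum := by
  intro l
  induction l with
  | nil => intro v; simp
  | cons a l ih =>
    intro v
    simp only [List.foldl_cons, List.map_cons, List.sum_cons, ih]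
    by_cases h : a ∈ s
    · rw [if_pos ((PySem.Set.contains_iff _ _).mpr h), if_pos h]; ring
    · rw [if_neg (fun hc => h ((PySem.Set.contains_iff _ _).mp hc)), if_neg h]; ring

-- the grouped afts of x, counted against p, equal the per-rule indicator sum for bef = x
theorem pvGroupCount (x : Int) (p : List Int) :
    ∀ (rs : List (Int × Int)),
      ((rs.filter (fun r => r.1 == x)).map
          (fun r => if r.2 ∈ p then (1:Int) else 0)).sum
        = (rs.map (fun r => if r.1 = x ∧ r.2 ∈ p then (1:Int) else 0)).sum := by
  intro rs
  induction rs with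
  | nil => simp
  | cons r rs ih =>
    simp only [List.filter_cons]
    by_cases h : r.1 = x
    · have hb : (r.1 == x) = true := by simp [h]
      simp only [hb, if_true, List.map_cons, List.sum_cons, ih]
      simp [h]
    · have hb : (r.1 == x) = false := by simp [h]
      simp only [hb, Bool.false_eq_true, if_false, List.map_cons, List.sum_cons, ih]
      simp [h]

theorem pvSumInd_append_not_mem {p : List Int} {x : Int} (hx : x ∉ p)
    (rs : List (Int × Int)) :
    (rs.map (pvInd (p ++ [x]))).sum
      = (rs.map (pvInd p)).sum
        + (rs.map (fun r => if r.1 = x ∧ r.2 ∈ p then (1:Int) else 0)).sum := by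
  induction rs with
  | nil => simp
  | cons r rs ih =>
    simp only [List.map_cons, List.sum_cons, ih, pvInd_append_not_mem hx r]
    ring

-- main sweep invariant: state (v, set(p)) after consuming rest adds exactly the new indicators
theorem pvSweep (rules : List (Int × Int)) :
    ∀ (rest p : List Int) (v : Int),
      (rest.foldl (fun (st : Int × PySem.Set Int) x =>
          if PySem.Set.contains st.2 x then st
          else
            (((rules.foldl (fun d r => d.modify r.1 [] (· ++ [r.2]))
                  PySem.Dict.empty).getD x []).foldl
                (fun v aft => if PySem.Set.contains st.2 aft then v + 1 else v) st.1,
             PySem.Set.add st.2 x))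
        (v, PySem.Set.ofList p)).1
      = v + (rules.map (pvInd (p ++ rest))).sum - (rules.map (pvInd p)).sum := by
  intro rest
  induction rest with
  | nil => intro p v; simp
  | cons x rest ih =>
    intro p v
    have happ : p ++ x :: rest = (p ++ [x]) ++ rest := by simp
    by_cases hx : x ∈ p
    · have hc : PySem.Set.contains (PySem.Set.ofList p) x = true :=
        (PySem.Set.contains_iff _ _).mpr ((PySem.Set.mem_ofList _ _).mpr hx)
      have hset : PySem.Set.ofList (p ++ [x]) = PySem.Set.ofList p := by
        rw [PySem.Set.ofList_append_singleton,
            PySem.Set.add_of_mem ((PySem.Set.mem_ofList _ _).mpr hx)]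
      have hsum : (rules.map (pvInd (p ++ [x]))).sum = (rules.map (pvInd p)).sum := by
        congr 1
        exact List.map_congr_left (fun r _ => pvInd_append_mem hx r)
      simp only [List.foldl_cons, hc, if_true]
      rw [show (v, PySem.Set.ofList p) = (v, PySem.Set.ofList (p ++ [x])) by rw [hset]]
      rw [ih (p ++ [x]) v, hsum, happ]
    · have hc : PySem.Set.contains (PySem.Set.ofList p) x = false := by
        apply Bool.eq_false_iff.mpr
        intro h
        exact hx ((PySem.Set.mem_ofList _ _).mp ((PySem.Set.contains_iff _ _).mp h))
      have hset : PySem.Set.add (PySem.Set.ofList p) x = PySem.Set.ofList (p ++ [x]) := by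
        rw [PySem.Set.ofList_append_singleton]
      have hgetD : ((rules.foldl (fun d r => d.modify r.1 [] (· ++ [r.2]))
            PySem.Dict.empty).getD x [])
          = (rules.filter (fun r => r.1 == x)).map (·.2) := by
        rw [PySem.Dict.getD_foldl_modify_append]
        simp [PySem.Dict.getD_empty]
      simp only [List.foldl_cons, hc, Bool.false_eq_true, if_false]
      rw [hgetD, pvInner, hset, ih (p ++ [x])]
      have hmem : ∀ (a : Int), (a ∈ PySem.Set.ofList p) ↔ a ∈ p := fun a => PySem.Set.mem_ofList _ _
      have hmapeq : (((rules.filter (fun r => r.1 == x)).map (·.2)).map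
            (fun a => if a ∈ PySem.Set.ofList p then (1:Int) else 0)).sum
          = (rules.map (fun r => if r.1 = x ∧ r.2 ∈ p then (1:Int) else 0)).sum := by
        rw [List.map_map, ← pvGroupCount x p rules]
        congr 1
        exact List.map_congr_left (fun r _ => by
          by_cases h : r.2 ∈ p <;> simp [Function.comp, hmem, h])
      rw [hmapeq, pvSumInd_append_not_mem hx rules, happ]
      ring

theorem pvA_eq_sum (u : List Int) (rules : List (Int × Int)) :
    violations u rules = (rules.map (pvInd u)).sum := by
  unfold violations
  rw [pvA_foldl u rules 0]
  ring

theorem pvB_eq_sum (u : List Int) (rules : List (Int × Int)) :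
    violations_alt u rules = (rules.map (pvInd u)).sum := by
  unfold violations_alt
  have h0 : (PySem.Set.empty : PySem.Set Int) = PySem.Set.ofList [] := rfl
  simp only [h0]
  rw [pvSweep rules u []]
  have : (rules.map (pvInd [])).sum = 0 := by
    have : ∀ r : Int × Int, pvInd [] r = 0 := by
      intro r; unfold pvInd; simp
    rw [List.map_congr_left (fun r _ => this r)]
    simp
  rw [this]
  simp

-- ===== VERDICT (by name: the statement is the Claim_ definition above) =====
theorem violations_spec : Claim_equal_violations := by
  intro u rules _
  unfold Spec_violations
  rw [pvA_eq_sum, pvB_eq_sum]
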